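-- pv_equiv track=rewrite | github.com/JacobusTheOne/GuessAllTheWords | WorkingWithList.py | WordIsInList
-- ===== SOURCE A (Python) =====
-- def WordIsInList(word, keyWord):
--     listkeyword = list(keyWord)
--     listword = list(word)
--     b = True
--     for x in listword:
--         if x in listkeyword:
--             listkeyword.remove(x)
--             continue
--         else:
--             b = False
--             break
--     return b
-- ===== SOURCE B (Python) =====
-- def WordIsInList(word, keyWord):
--     lw = list(word)
--     lk = list(keyWord)
--     return all(lw.count(c) <= lk.count(c) for c in set(lw))
-- ===== Notes on version B (the rewrite author's own statement) =====
-- stated objective: simpler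
-- what changed: A's mutate-and-early-exit loop (per-letter membership test + remove on a shrinking copy of keyWord) is replaced by an aggregate count comparison over the distinct letters of word; no mutation, no removal loop.
import Mathlib
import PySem

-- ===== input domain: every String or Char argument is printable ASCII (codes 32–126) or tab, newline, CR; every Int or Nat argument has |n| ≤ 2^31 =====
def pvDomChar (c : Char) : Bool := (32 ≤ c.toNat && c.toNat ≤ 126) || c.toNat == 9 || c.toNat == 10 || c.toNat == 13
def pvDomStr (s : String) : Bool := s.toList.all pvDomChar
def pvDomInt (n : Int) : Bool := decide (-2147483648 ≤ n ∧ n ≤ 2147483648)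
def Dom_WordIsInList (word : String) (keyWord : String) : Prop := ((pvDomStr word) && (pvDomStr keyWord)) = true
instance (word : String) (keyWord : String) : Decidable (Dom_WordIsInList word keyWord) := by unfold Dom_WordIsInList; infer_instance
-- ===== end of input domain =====

-- B replaces A's membership-test-and-remove loop over a shrinking copy of keyWord by an
-- aggregate count comparison over the distinct letters of word (simpler; no mutation, no early exit).

-- ===== PORT A =====
-- A's for-loop: on each letter x of word, if x is in the remaining key letters remove its
-- first occurrence and continue, else return False; True when the loop finishes.
def pvLoopA : List Char → List Char → Bool
  | [], _ => true
  | x :: xs, ks =>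
    match PySem.List.remove? ks x with
    | some ks' => pvLoopA xs ks'
    | none => false

def WordIsInList (word : String) (keyWord : String) : Bool :=
  pvLoopA word.toList keyWord.toList

-- ===== PORT B =====
-- Source B: all(lw.count(c) <= lk.count(c) for c in set(lw))  — order over the set is irrelevant to `all`.
def WordIsInList_alt (word : String) (keyWord : String) : Bool :=
  let lw := word.toList
  let lk := keyWord.toList
  (PySem.Set.ofList lw).all (fun c => decide (PySem.List.count lw c ≤ PySem.List.count lk c))

-- ===== PRECONDITION & SPEC =====
def Spec_WordIsInList (word : String) (keyWord : String) (out : Bool) : Prop := out = WordIsInList_alt word keyWord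
instance (word : String) (keyWord : String) (out : Bool) : Decidable (Spec_WordIsInList word keyWord out) := by unfold Spec_WordIsInList; infer_instance

-- ===== CLAIM (what is proved, stated in full; the proofs are below) =====
def Claim_equal_WordIsInList : Prop := ∀ (word : String) (keyWord : String), Dom_WordIsInList word keyWord → Spec_WordIsInList word keyWord (WordIsInList word keyWord)

-- ===== LEMMAS AND PROOFS =====

-- A's loop decides the multiset-subset relation.
theorem pvLoopA_eq_decide (ws ks : List Char) :
    pvLoopA ws ks = decide ((ws : Multiset Char) ≤ (ks : Multiset Char)) := by
  induction ws generalizing ks with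
  | nil => simp [pvLoopA]
  | cons x xs ih =>
    rw [pvLoopA]
    rcases h : PySem.List.remove? ks x with _ | ks'
    · have hx : x ∉ ks := (PySem.List.remove?_eq_none_iff ks x).mp h
      have hxm : x ∈ ((x :: xs : List Char) : Multiset Char) := by simp
      have hnle : ¬ ((x :: xs : List Char) : Multiset Char) ≤ (ks : Multiset Char) := fun hle =>
        hx (by simpa using Multiset.mem_of_le hle hxm)
      simp [hnle]
    · have hx : x ∈ ks := by
        by_contra hx
        rw [(PySem.List.remove?_eq_none_iff ks x).mpr hx] at h
        cases h
      have hks' : ks' = ks.erase x := by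
        have h2 := PySem.List.remove?_eq_some_erase (xs := ks) (v := x) hx
        rw [h2] at h
        exact (Option.some.inj h).symm
      subst hks'
      show pvLoopA xs (ks.erase x) = decide (((x :: xs : List Char) : Multiset Char) ≤ (ks : Multiset Char))
      rw [ih, decide_eq_decide]
      have hxm : x ∈ (ks : Multiset Char) := by simpa using hx
      have hcons : (x ::ₘ ((ks.erase x : List Char) : Multiset Char)) = (ks : Multiset Char) := by
        rw [← Multiset.coe_erase]
        exact Multiset.cons_erase hxm
      have hxl : ((x :: xs : List Char) : Multiset Char) = x ::ₘ (xs : Multiset Char) := by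
        simp
      constructor
      · intro hle
        have h3 := (Multiset.cons_le_cons_iff (s := (xs : Multiset Char))
          (t := ((ks.erase x : List Char) : Multiset Char)) x).mpr hle
        rw [hcons, ← hxl] at h3; exact h3
      · intro hle
        have h3 : (x ::ₘ (xs : Multiset Char)) ≤ x ::ₘ ((ks.erase x : List Char) : Multiset Char) := by
          rw [hcons, ← hxl]; exact hle
        exact (Multiset.cons_le_cons_iff x).mp h3

-- B's aggregate comparison decides the same relation.
theorem alt_eq_decide (lw lk : List Char) :
    ((PySem.Set.ofList lw).all (fun c => decide (PySem.List.count lw c ≤ PySem.List.count lk c)))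
      = decide ((lw : Multiset Char) ≤ (lk : Multiset Char)) := by
  have hiff : (∀ c ∈ PySem.Set.ofList lw, lw.count c ≤ lk.count c)
      ↔ ((lw : Multiset Char) ≤ (lk : Multiset Char)) := by
    rw [Multiset.le_iff_count]
    constructor
    · intro h a
      by_cases ha : a ∈ lw
      · simpa using h a ((PySem.Set.mem_ofList lw a).mpr ha)
      · simp [List.count_eq_zero_of_not_mem ha]
    · intro h c _
      simpa using h c
  simp only [PySem.List.count_eq]
  have h2 : ((PySem.Set.ofList lw).all (fun c => decide (List.count c lw ≤ List.count c lk))) = true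
      ↔ ((lw : Multiset Char) ≤ (lk : Multiset Char)) := by
    rw [List.all_eq_true]
    simpa using hiff
  by_cases h : (lw : Multiset Char) ≤ (lk : Multiset Char)
  · exact (h2.mpr h).trans (decide_eq_true h).symm
  · rw [decide_eq_false h, Bool.eq_false_iff]
    exact fun hb => h (h2.mp hb)

-- ===== VERDICT (by name: the statement is the Claim_ definition above) =====
theorem WordIsInList_spec : Claim_equal_WordIsInList := by
  intro word keyWord _
  unfold Spec_WordIsInList WordIsInList WordIsInList_alt
  rw [pvLoopA_eq_decide, alt_eq_decide]
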